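-- pv_equiv track=rewrite | github.com/sgzrov/Voyant | Backend/services/sql_gen.py | _strip_sql_strings_and_comments
-- ===== SOURCE A (Python) =====
-- def _strip_sql_strings_and_comments(sql: object) -> str:
--     if not isinstance(sql, str):
--         return ""
--
--     s = sql
--     n = len(s)
--     out: list[str] = []
--     i = 0
--     in_line_comment = False
--     in_block_comment = False
--     in_string = False
--
--     while i < n:
--         ch = s[i]
--         nxt = s[i + 1] if i + 1 < n else ""
--
--         if in_line_comment:
--             if ch == "\n":
--                 in_line_comment = False
--                 out.append("\n")
--             else:
--                 out.append(" ")
--             i += 1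
--             continue
--
--         if in_block_comment:
--             if ch == "*" and nxt == "/":
--                 in_block_comment = False
--                 out.append(" ")
--                 out.append(" ")
--                 i += 2
--             else:
--                 out.append("\n" if ch == "\n" else " ")
--                 i += 1
--             continue
--
--         if not in_string and ch == "-" and nxt == "-":
--             in_line_comment = True
--             out.append(" ")
--             out.append(" ")
--             i += 2
--             continue
--         if not in_string and ch == "/" and nxt == "*":
--             in_block_comment = True
--             out.append(" ")
--             out.append(" ")
--             i += 2
--             continue
--
--         if in_string:
--             if ch == "'":
--                 if nxt == "'":
--                     out.append("'")
--                     out.append("'")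
--                     i += 2
--                     continue
--                 in_string = False
--                 out.append("'")
--                 i += 1
--                 continue
--             out.append("\n" if ch == "\n" else " ")
--             i += 1
--             continue
--         else:
--             if ch == "'":
--                 in_string = True
--                 out.append("'")
--                 i += 1
--                 continue
--
--         out.append(ch)
--         i += 1
--
--     return "".join(out)
-- ===== SOURCE B (Python) =====
-- def _strip_sql_strings_and_comments(sql: object) -> str:
--     if not isinstance(sql, str):
--         return ""
--     out = []
--     i = 0
--     n = len(sql)
--     while i < n:
--         ch = sql[i]
--         if ch == "'":
--             # find end of string literal, honouring '' escapes (unterminated -> end)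
--             j = i + 1
--             while j < n:
--                 if sql[j] == "'":
--                     if j + 1 < n and sql[j + 1] == "'":
--                         j += 2
--                         continue
--                     j += 1
--                     break
--                 j += 1
--             out.append("".join(c if c in ("'", "\n") else " " for c in sql[i:j]))
--             i = j
--         elif sql.startswith("--", i):
--             j = sql.find("\n", i)
--             if j == -1:
--                 j = n
--             out.append(" " * (j - i))
--             i = j
--         elif sql.startswith("/*", i):
--             j = sql.find("*/", i + 2)
--             end = n if j == -1 else j + 2
--             out.append("".join(c if c == "\n" else " " for c in sql[i:end]))
--             i = end
--         else:
--             out.append(ch)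
--             i += 1
--     return "".join(out)
-- ===== Notes on version B (the rewrite author's own statement) =====
-- stated objective: alternative
-- what changed: Replaced A's per-character loop with three boolean state flags (in_string/in_line_comment/in_block_comment) by a region scanner that, at each string quote or comment opener, locates the region's terminator (inner scan / str.find) and blanks the whole region at once, copying ordinary text unchanged.
import Mathlib
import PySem

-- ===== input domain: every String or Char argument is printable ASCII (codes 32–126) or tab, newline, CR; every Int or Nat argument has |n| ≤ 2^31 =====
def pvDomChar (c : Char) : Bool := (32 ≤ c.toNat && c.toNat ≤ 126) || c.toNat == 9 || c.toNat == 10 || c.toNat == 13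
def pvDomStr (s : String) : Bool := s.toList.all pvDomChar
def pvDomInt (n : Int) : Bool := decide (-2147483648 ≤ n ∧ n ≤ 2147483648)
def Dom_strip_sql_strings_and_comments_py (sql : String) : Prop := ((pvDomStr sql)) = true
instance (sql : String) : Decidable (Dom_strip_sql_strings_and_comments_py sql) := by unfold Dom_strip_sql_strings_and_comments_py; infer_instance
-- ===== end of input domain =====

-- B replaces A's per-character three-flag state machine by a region scanner that finds each
-- string/comment region's end and blanks it wholesale (objective: simpler/alternative; return value only).

-- ===== PORT A =====
-- literal port of A's while loop: state (in_line_comment, in_block_comment, in_string),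
-- ch = head, nxt = rest.head? (Python's "" when i+1 ≥ n becomes none)
def stripGoA : List Char → Bool → Bool → Bool → List Char
  | [], _, _, _ => []
  | ch :: rest, inLine, inBlock, inStr =>
    if inLine then
      if ch = '\n' then '\n' :: stripGoA rest false inBlock inStr
      else ' ' :: stripGoA rest true inBlock inStr
    else if inBlock then
      if ch = '*' ∧ rest.head? = some '/' then
        ' ' :: ' ' :: stripGoA rest.tail inLine false inStr
      else (if ch = '\n' then '\n' else ' ') :: stripGoA rest inLine true inStr
    else if (¬ inStr) ∧ ch = '-' ∧ rest.head? = some '-' then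
      ' ' :: ' ' :: stripGoA rest.tail true inBlock inStr
    else if (¬ inStr) ∧ ch = '/' ∧ rest.head? = some '*' then
      ' ' :: ' ' :: stripGoA rest.tail inLine true inStr
    else if inStr then
      if ch = '\'' then
        if rest.head? = some '\'' then '\'' :: '\'' :: stripGoA rest.tail inLine inBlock true
        else '\'' :: stripGoA rest inLine inBlock false
      else (if ch = '\n' then '\n' else ' ') :: stripGoA rest inLine inBlock true
    else if ch = '\'' then '\'' :: stripGoA rest inLine inBlock true
    else ch :: stripGoA rest inLine inBlock inStr
  termination_by l => l.length
  decreasing_by all_goals cases rest <;> simp [List.tail] <;> try omega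

def strip_sql_strings_and_comments_py (sql : String) : String :=
  String.mk (stripGoA sql.toList false false false)

-- ===== PORT B =====
-- length of the string-literal body after the opening quote (incl. closing quote; '' stays)
def stripStrBody : List Char → Nat
  | [] => 0
  | '\'' :: rest =>
    match rest with
    | '\'' :: rest2 => 2 + stripStrBody rest2
    | _ => 1
  | _ :: rest => 1 + stripStrBody rest

-- length of a block-comment body after "/*" up to and including "*/" (or to end)
def stripBlockBody : List Char → Nat
  | [] => 0
  | '*' :: rest =>
    match rest with
    | '/' :: _ => 2
    | _ => 1 + stripBlockBody rest
  | _ :: rest => 1 + stripBlockBody rest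

def stripGoB : List Char → List Char
  | [] => []
  | '\'' :: rest =>
    let m := stripStrBody rest
    '\'' :: ((rest.take m).map (fun c => if c = '\'' ∨ c = '\n' then c else ' ')
              ++ stripGoB (rest.drop m))
  | '-' :: '-' :: rest =>
    let k := (rest.takeWhile (· ≠ '\n')).length
    ' ' :: ' ' :: (List.replicate k ' ' ++ stripGoB (rest.drop k))
  | '/' :: '*' :: rest =>
    let m := stripBlockBody rest
    ' ' :: ' ' :: ((rest.take m).map (fun c => if c = '\n' then c else ' ')
                    ++ stripGoB (rest.drop m))
  | c :: rest => c :: stripGoB rest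
  termination_by l => l.length
  decreasing_by all_goals simp <;> omega

def strip_sql_strings_and_comments_py_alt (sql : String) : String :=
  String.mk (stripGoB sql.toList)

-- ===== PRECONDITION & SPEC =====
def Spec_strip_sql_strings_and_comments_py (sql : String) (out : String) : Prop := out = strip_sql_strings_and_comments_py_alt sql
instance (sql : String) (out : String) : Decidable (Spec_strip_sql_strings_and_comments_py sql out) := by unfold Spec_strip_sql_strings_and_comments_py; infer_instance

-- ===== CLAIM (what is proved, stated in full; the proofs are below) =====
def Claim_equal_strip_sql_strings_and_comments_py : Prop := ∀ (sql : String), Dom_strip_sql_strings_and_comments_py sql → Spec_strip_sql_strings_and_comments_py sql (strip_sql_strings_and_comments_py sql)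

-- ===== LEMMAS AND PROOFS =====

theorem stripGoB_default (ch : Char) (rest : List Char) (h1 : ch ≠ '\'')
    (h2 : ¬(ch = '-' ∧ rest.head? = some '-')) (h3 : ¬(ch = '/' ∧ rest.head? = some '*')) :
    stripGoB (ch :: rest) = ch :: stripGoB rest := by
  rw [stripGoB.eq_def]
  split <;> simp_all

theorem stripStrBody_other (ch : Char) (rest : List Char) (h1 : ch ≠ '\'') :
    stripStrBody (ch :: rest) = 1 + stripStrBody rest := by
  rw [stripStrBody.eq_def]
  split <;> simp_all

theorem stripBlockBody_other (ch : Char) (rest : List Char)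
    (h : ¬(ch = '*' ∧ rest.head? = some '/')) :
    stripBlockBody (ch :: rest) = 1 + stripBlockBody rest := by
  rw [stripBlockBody.eq_def]
  split <;> try simp_all
  split <;> simp_all

theorem stripGoA_eq_stripGoB :
    ∀ n (l : List Char), l.length ≤ n →
      (stripGoA l false false false = stripGoB l) ∧
      (stripGoA l true false false =
        List.replicate (l.takeWhile (· ≠ '\n')).length ' '
          ++ stripGoB (l.drop (l.takeWhile (· ≠ '\n')).length)) ∧
      (stripGoA l false true false =
        (l.take (stripBlockBody l)).map (fun c => if c = '\n' then c else ' ')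
          ++ stripGoB (l.drop (stripBlockBody l))) ∧
      (stripGoA l false false true =
        (l.take (stripStrBody l)).map (fun c => if c = '\'' ∨ c = '\n' then c else ' ')
          ++ stripGoB (l.drop (stripStrBody l))) := by
  intro n
  induction n with
  | zero =>
    intro l hl
    have : l = [] := by cases l <;> simp_all
    subst this
    simp [stripGoA, stripGoB, stripStrBody, stripBlockBody]
  | succ n ih =>
    intro l hl
    cases l with
    | nil => simp [stripGoA, stripGoB, stripStrBody, stripBlockBody]
    | cons ch rest =>
      have hr : rest.length ≤ n := by simp at hl; omega
      obtain ⟨ih1, ih2, ih3, ih4⟩ := ih rest hr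
      refine ⟨?_, ?_, ?_, ?_⟩
      · -- normal state
        by_cases hq : ch = '\''
        · subst hq
          simp only [stripGoA, stripGoB]
          simp [ih4]
        · by_cases hd : ch = '-' ∧ rest.head? = some '-'
          · obtain ⟨h1, h2⟩ := hd
            subst h1
            obtain ⟨c2, rest2, rfl⟩ : ∃ c r, rest = c :: r := by
              cases rest with
              | nil => simp_all
              | cons a b => exact ⟨a, b, rfl⟩
            obtain rfl : c2 = '-' := by simp_all
            have hr2 : rest2.length ≤ n := by simp at hr; omega
            obtain ⟨_, jh2, _, _⟩ := ih rest2 hr2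
            simp only [stripGoA, stripGoB]
            simp [jh2, List.tail]
          · by_cases hs : ch = '/' ∧ rest.head? = some '*'
            · obtain ⟨h1, h2⟩ := hs
              subst h1
              obtain ⟨c2, rest2, rfl⟩ : ∃ c r, rest = c :: r := by
                cases rest with
              | nil => simp_all
              | cons a b => exact ⟨a, b, rfl⟩
              obtain rfl : c2 = '*' := by simp_all
              have hr2 : rest2.length ≤ n := by simp at hr; omega
              obtain ⟨_, _, jh3, _⟩ := ih rest2 hr2
              simp only [stripGoA]
              rw [stripGoB]
              simp [jh3, List.tail]
            · simp only [stripGoA]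
              rw [stripGoB_default ch rest hq hd hs]
              simp [ih1, hq, hd, hs]
      · -- line-comment state
        by_cases hn : ch = '\n'
        · subst hn
          simp only [stripGoA, List.takeWhile_cons]
          simp [stripGoB_default '\n' rest (by decide) (by simp) (by simp), ih1]
        · simp only [stripGoA]
          rw [List.takeWhile_cons]
          simp [hn, ih2, List.replicate_succ]
      · -- block-comment state
        by_cases hb : ch = '*' ∧ rest.head? = some '/'
        · obtain ⟨h1, h2⟩ := hb
          subst h1
          obtain ⟨c2, rest2, rfl⟩ : ∃ c r, rest = c :: r := by
            cases rest with
              | nil => simp_all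
              | cons a b => exact ⟨a, b, rfl⟩
          obtain rfl : c2 = '/' := by simp_all
          have hr2 : rest2.length ≤ n := by simp at hr; omega
          obtain ⟨jh1, _, _, _⟩ := ih rest2 hr2
          simp only [stripGoA]
          rw [stripBlockBody]
          simp [jh1, List.tail]
        · simp only [stripGoA]
          rw [stripBlockBody_other ch rest hb]
          simp [hb, ih3, List.take_succ_cons, List.drop_succ_cons, Nat.add_comm 1]
          split_ifs with hnl <;> simp [hnl]
      · -- string state
        by_cases hq : ch = '\''
        · subst hq
          cases rest with
          | nil =>
            simp [stripGoA, stripGoB, stripStrBody]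
          | cons c2 rest2 =>
            by_cases hq2 : c2 = '\''
            · subst hq2
              have hr2 : rest2.length ≤ n := by simp at hr; omega
              obtain ⟨_, _, _, jh4⟩ := ih rest2 hr2
              simp only [stripGoA]
              rw [stripStrBody]
              simp [jh4, List.tail, Nat.add_comm 2]
            · rw [stripGoA, stripStrBody.eq_def]
              simp [hq2]
              rw [ih1]
        · simp only [stripGoA]
          rw [stripStrBody_other ch rest hq]
          simp [hq, ih4, Nat.add_comm 1]
          split_ifs with hnl <;> simp [hnl]

-- ===== VERDICT (by name: the statement is the Claim_ definition above) =====
theorem strip_sql_strings_and_comments_py_spec : Claim_equal_strip_sql_strings_and_comments_py := by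
  intro sql _
  unfold Spec_strip_sql_strings_and_comments_py strip_sql_strings_and_comments_py strip_sql_strings_and_comments_py_alt
  exact congrArg String.mk ((stripGoA_eq_stripGoB sql.toList.length sql.toList le_rfl).1)
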